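-- pv_equiv track=rewrite | github.com/MathiasSJacobsen/julekalender | 2021/AoC/luke3.py | findMostCommen
-- ===== SOURCE A (Python) =====
-- def findMostCommen(x, listOfBits):
--     en = 0
--     tableWithOnes = []
--     null = 0
--     tableWithZeros = []
--     for y in range(len(listOfBits)):
--         if listOfBits[y][x] == "1":
--             en += 1
--             tableWithOnes.append(listOfBits[y])
--         else:
--             null += 1
--             tableWithZeros.append(listOfBits[y])
--     if en >= null:
--         return '1', tableWithOnes
--     else:
--         return '0', tableWithZeros
-- ===== SOURCE B (Python) =====
-- def findMostCommen(x, listOfBits):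
--     # stable sort by the boolean key puts the '1'-at-x rows first (original
--     # order preserved), the rest after; the answer is then a slice.
--     srt = sorted(listOfBits, key=lambda row: row[x] != "1")
--     k = 0
--     while k < len(srt) and srt[k][x] == "1":
--         k += 1
--     if k >= len(srt) - k:
--         return '1', srt[:k]
--     else:
--         return '0', srt[k:]
-- ===== Notes on version B (the rewrite author's own statement) =====
-- stated objective: alternative
-- what changed: Instead of an index loop maintaining two counters and both partitions, B stably sorts the rows by the boolean key row[x] != '1' (ones first, order preserved), scans for the split point, and returns the winning side as a slice.
import Mathlib
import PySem

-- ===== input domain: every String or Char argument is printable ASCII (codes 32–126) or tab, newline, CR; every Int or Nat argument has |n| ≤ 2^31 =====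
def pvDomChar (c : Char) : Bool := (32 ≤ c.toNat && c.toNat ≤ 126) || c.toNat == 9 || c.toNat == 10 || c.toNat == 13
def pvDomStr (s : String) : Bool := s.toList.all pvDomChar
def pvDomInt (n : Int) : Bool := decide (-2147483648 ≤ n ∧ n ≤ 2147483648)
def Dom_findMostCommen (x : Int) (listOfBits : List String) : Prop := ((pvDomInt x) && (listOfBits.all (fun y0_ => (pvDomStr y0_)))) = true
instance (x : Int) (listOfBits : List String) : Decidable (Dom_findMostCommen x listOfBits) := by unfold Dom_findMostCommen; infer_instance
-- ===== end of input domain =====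

-- B replaces A's index loop (two counters, both partitions) by a stable sort on the
-- boolean key row[x] != '1' followed by a scan for the split point; same cost class,
-- a genuinely different (sort-then-slice) strategy, not claimed faster.

-- ===== PORT A =====
-- state: (en, tableWithOnes, null, tableWithZeros); loop over y in range(len(listOfBits))
def findMostCommen (x : Int) (listOfBits : List String) : String × List String :=
  let st := (PySem.List.pyRange 0 (listOfBits.length : Int) 1).foldl
    (fun (acc : Nat × List String × Nat × List String) y =>
      if PySem.Str.pyGet? (PySem.List.pyGetD listOfBits y "") x == some '1' then
        (acc.1 + 1, acc.2.1 ++ [PySem.List.pyGetD listOfBits y ""], acc.2.2.1, acc.2.2.2)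
      else
        (acc.1, acc.2.1, acc.2.2.1 + 1, acc.2.2.2 ++ [PySem.List.pyGetD listOfBits y ""]))
    (0, [], 0, [])
  if st.2.2.1 ≤ st.1 then ("1", st.2.1) else ("0", st.2.2.2)

-- ===== PORT B =====
-- the 'while k < len(srt) and srt[k][x] == "1"' scan, as the obvious structural recursion
def pvScanOnes (x : Int) : List String → Nat
  | [] => 0
  | r :: t => if PySem.Str.pyGet? r x == some '1' then pvScanOnes x t + 1 else 0

-- Python's bool key (False < True) is ported exactly as the Nat key 0/1;
-- srt[:k] / srt[k:] with 0 ≤ k ≤ len are exactly take/drop.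
def findMostCommen_alt (x : Int) (listOfBits : List String) : String × List String :=
  let srt := PySem.List.sorted listOfBits
    (fun row => if PySem.Str.pyGet? row x == some '1' then (0 : Nat) else 1)
  let k := pvScanOnes x srt
  if srt.length - k ≤ k then ("1", srt.take k) else ("0", srt.drop k)

-- ===== PRECONDITION & SPEC =====
-- Python A evaluates row[x] for every row, so it raises IndexError unless x is a valid
-- (possibly negative) index into every row; Pre_ admits exactly the non-raising inputs.
def Pre_findMostCommen (x : Int) (listOfBits : List String) : Prop :=
  ∀ s ∈ listOfBits, PySem.Raise.InRange s.toList.length x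
instance (x : Int) (listOfBits : List String) : Decidable (Pre_findMostCommen x listOfBits) := by
  unfold Pre_findMostCommen; infer_instance

def pvWitness_findMostCommen : Int × List String := (0, ["10", "01", "11"])

def Spec_findMostCommen (x : Int) (listOfBits : List String) (out : String × List String) : Prop := out = findMostCommen_alt x listOfBits
instance (x : Int) (listOfBits : List String) (out : String × List String) : Decidable (Spec_findMostCommen x listOfBits out) := by unfold Spec_findMostCommen; infer_instance

-- ===== CLAIM (what is proved, stated in full; the proofs are below) =====
def Claim_equal_findMostCommen : Prop := ∀ (x : Int) (listOfBits : List String), Dom_findMostCommen x listOfBits → Pre_findMostCommen x listOfBits → Spec_findMostCommen x listOfBits (findMostCommen x listOfBits)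

-- ===== LEMMAS AND PROOFS =====

-- A's loop, viewed as a fold over the list itself, computes counters and both partitions.
theorem pv_foldA (p : String → Bool) (l : List String)
    (en nul : Nat) (ones zeros : List String) :
    l.foldl
      (fun (acc : Nat × List String × Nat × List String) row =>
        if p row then (acc.1 + 1, acc.2.1 ++ [row], acc.2.2.1, acc.2.2.2)
        else (acc.1, acc.2.1, acc.2.2.1 + 1, acc.2.2.2 ++ [row]))
      (en, ones, nul, zeros)
    = (en + l.countP p, ones ++ l.filter p,
       nul + l.countP (fun r => !p r), zeros ++ l.filter (fun r => !p r)) := by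
  induction l generalizing en nul ones zeros with
  | nil => simp
  | cons h t ih =>
    by_cases hp : p h = true <;>
      simp [List.foldl_cons, hp, ih] <;> omega

theorem pv_count_split (p : String → Bool) (l : List String) :
    l.countP (fun r => !p r) = l.length - l.countP p := by
  induction l with
  | nil => simp
  | cons h t ih =>
    have hle := List.countP_le_length (p := p) (l := t)
    by_cases hp : p h = true <;> simp [hp, ih]; omega

-- inserting a key-0 element goes right after the key-0 prefix A, before B
theorem pv_insert_mid {α : Type} (bf : α → α → Bool) (r : α) (A B : List α)
    (hA : ∀ a ∈ A, bf r a = false) (hB : ∀ b ∈ B, bf r b = true) :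
    PySem.List.insertBy bf r (A ++ B) = A ++ r :: B := by
  induction A with
  | nil =>
    cases B with
    | nil => simp [PySem.List.insertBy_of_forall_not_before]
    | cons b B' => simp [PySem.List.insertBy, hB b (by simp)]
  | cons a A' ih =>
    simp only [List.cons_append, PySem.List.insertBy, hA a (by simp)]
    simp [ih (fun a ha => hA a (by simp [ha]))]

-- the stable insertion sort on a 0/1 key is exactly filter ++ filter
theorem pv_fold_insert (p : String → Bool) (l A B : List String)
    (hA : ∀ a ∈ A, p a = true) (hB : ∀ b ∈ B, p b = false) :
    l.foldl (fun acc r => PySem.List.insertBy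
        (fun a b => decide ((if p a then (0:Nat) else 1) < (if p b then (0:Nat) else 1))) r acc)
      (A ++ B)
    = (A ++ l.filter p) ++ (B ++ l.filter (fun r => !p r)) := by
  induction l generalizing A B with
  | nil => simp
  | cons r t ih =>
    by_cases hp : p r = true
    · rw [List.foldl_cons,
        pv_insert_mid _ r A B
          (fun a ha => by simp [hp, hA a ha])
          (fun b hb => by simp [hp, hB b hb]),
        show A ++ r :: B = (A ++ [r]) ++ B by simp]
      have hA' : ∀ a ∈ A ++ [r], p a = true := by
        intro a ha
        rcases List.mem_append.1 ha with h | h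
        · exact hA a h
        · simp at h; simpa [h] using hp
      rw [ih (A ++ [r]) B hA' hB]
      simp [hp]
    · rw [List.foldl_cons,
        PySem.List.insertBy_of_forall_not_before _ r (A ++ B)
          (by intro y hy; simp [hp]; split <;> simp),
        show (A ++ B) ++ [r] = A ++ (B ++ [r]) by simp]
      have hB' : ∀ b ∈ B ++ [r], p b = false := by
        intro b hb
        rcases List.mem_append.1 hb with h | h
        · exact hB b h
        · simp at h; simpa [h] using hp
      rw [ih A (B ++ [r]) hA hB']
      simp [hp]

theorem pv_sorted_partition (p : String → Bool) (l : List String) :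
    PySem.List.sorted l (fun row => if p row then (0:Nat) else 1)
      = l.filter p ++ l.filter (fun r => !p r) := by
  rw [PySem.List.sorted_eq_foldl_insertBy]
  simpa using pv_fold_insert p l [] [] (by simp) (by simp)

theorem pv_scan_eq (x : Int) (F1 F0 : List String)
    (h1 : ∀ r ∈ F1, (PySem.Str.pyGet? r x == some '1') = true)
    (h0 : ∀ r ∈ F0, (PySem.Str.pyGet? r x == some '1') = false) :
    pvScanOnes x (F1 ++ F0) = F1.length := by
  induction F1 with
  | nil =>
    cases F0 with
    | nil => rfl
    | cons r t =>
      have := h0 r (by simp)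
      simp only [List.nil_append, pvScanOnes, this]
      simp
  | cons r t ih =>
    have := h1 r (by simp)
    simp only [List.cons_append, pvScanOnes, this, if_true,
      ih (fun s hs => h1 s (by simp [hs])), List.length_cons]

-- ===== VERDICT =====
theorem findMostCommen_spec : Claim_equal_findMostCommen := by
  intro x l _ _
  unfold Spec_findMostCommen findMostCommen findMostCommen_alt
  set p : String → Bool := fun row => PySem.Str.pyGet? row x == some '1' with hp
  rw [show ((0 : Int)) = ((0 : Nat) : Int) from rfl,
    show ((l.length : Int)) = PySem.List.len l from rfl,
    PySem.List.foldl_pyRange_pyGetD (f := fun (acc : Nat × List String × Nat × List String) row =>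
      if p row then (acc.1 + 1, acc.2.1 ++ [row], acc.2.2.1, acc.2.2.2)
      else (acc.1, acc.2.1, acc.2.2.1 + 1, acc.2.2.2 ++ [row]))
      (xs := l) (d := "") (init := (0, [], 0, [])) (by omega)]
  simp only [Int.toNat_natCast, List.drop_zero, pv_foldA, Nat.zero_add, List.nil_append]
  rw [pv_sorted_partition p l,
    pv_scan_eq x (l.filter p) (l.filter (fun r => !p r))
      (fun r hr => (List.mem_filter.1 hr).2)
      (fun r hr => by
        have h := (List.mem_filter.1 hr).2
        rw [hp] at h
        simpa using h)]
  have hcf : (l.filter p).length = l.countP p := List.countP_eq_length_filter.symm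
  have hcf0 : (l.filter (fun r => !p r)).length = l.countP (fun r => !p r) :=
    List.countP_eq_length_filter.symm
  rw [pv_count_split]
  simp only [List.length_append, hcf, hcf0]
  rw [pv_count_split]
  by_cases hc : l.length - l.countP p ≤ l.countP p
  · simp [hc, List.take_left' hcf]
  · simp [hc, List.drop_left' hcf]
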